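-- pv_equiv track=rewrite | github.com/Python1965/Module_9 | Module_9_6_bis.py | get_list_partitions
-- ===== SOURCE A (Python) =====
-- import itertools
--
-- def get_list_partitions(string):
--     partitions = []
--
--     # list of binary sequences
--     binary_sequences = ["".join(seq) for seq in itertools.product("01", repeat=len(string) - 1)]
--
--     # go over every binary sequence (which represents a partition)
--     for sequence in binary_sequences:
--         partition = []
--
--         # current substring, accumulates letters until it encounters "1" in the binary sequence
--         curr_substring = string[0]
--         for i, bit in enumerate(sequence):
--             # if 0, don't partition. otherwise, add curr_substring to the current partition and set curr_substring to be the next letter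
--             if bit == '0':
--                 curr_substring = curr_substring + string[i + 1]
--             else:
--                 partition.append(curr_substring)
--                 curr_substring = string[i + 1]
--
--                 # add the last substring to the partition
--         partition.append(curr_substring)
--
--         # add partition to the list of partitions
--         partitions.append(partition)
--
--     return partitions
-- ===== SOURCE B (Python) =====
-- def get_list_partitions(string):
--     # Recursive decomposition: partitions of s = (merge first char into the head
--     # piece of each tail partition) ++ (first char as its own piece).
--     if len(string) <= 1:
--         return [[string]]
--     head, tail = string[0], string[1:]
--     parts = get_list_partitions(tail)
--     return [[head + p[0]] + p[1:] for p in parts] + [[head] + p for p in parts]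
-- ===== Notes on version B (the rewrite author's own statement) =====
-- stated objective: alternative
-- what changed: Replaces A's enumeration of all binary gap sequences via itertools.product plus an indexed inner scan per sequence by a direct recursion on the tail string: each tail partition yields a merge-head partition and a split-head partition, emitted as two blocks to keep A's order.
import Mathlib
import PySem

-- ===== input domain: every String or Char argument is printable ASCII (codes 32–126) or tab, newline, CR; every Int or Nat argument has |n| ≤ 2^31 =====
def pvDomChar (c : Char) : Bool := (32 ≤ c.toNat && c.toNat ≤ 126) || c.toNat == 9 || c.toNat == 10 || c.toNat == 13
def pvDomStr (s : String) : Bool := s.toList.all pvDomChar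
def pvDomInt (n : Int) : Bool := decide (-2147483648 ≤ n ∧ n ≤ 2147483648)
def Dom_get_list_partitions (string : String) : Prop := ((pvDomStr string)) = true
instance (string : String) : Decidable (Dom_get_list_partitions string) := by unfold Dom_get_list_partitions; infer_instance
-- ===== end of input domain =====

-- B replaces A's bitmask enumeration by a direct recursion on the tail string
-- (merge-head block ++ split-head block); objective: alternative algorithm, same output order.

-- ===== PORT A =====
-- itertools.product("01", repeat=n): first position varies slowest
def pvSeqsA : Nat → List (List Char)
  | 0 => [[]]
  | n + 1 => ['0', '1'].flatMap (fun b => (pvSeqsA n).map (b :: ·))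

-- the inner 'for i, bit in enumerate(sequence)' loop; i is the enumerate counter;
-- the current substring is kept as List Char (Python str on the ASCII domain)
def pvInnerA (cs : List Char) (i : Nat) : List Char → List (List Char) → List Char → List (List Char)
  | [], part, curr => part ++ [curr]
  | bit :: rest, part, curr =>
    if bit = '0' then
      pvInnerA cs (i + 1) rest part (curr ++ [(PySem.List.pyGet? cs ((i : Int) + 1)).getD ' '])
    else
      pvInnerA cs (i + 1) rest (part ++ [curr]) [(PySem.List.pyGet? cs ((i : Int) + 1)).getD ' ']

def get_list_partitions (string : String) : List (List String) :=
  let cs := string.toList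
  (pvSeqsA (cs.length - 1)).map (fun seq =>
    (pvInnerA cs 0 seq [] [(PySem.List.pyGet? cs 0).getD ' ']).map String.ofList)

-- ===== PORT B =====
-- recursive on the tail: merge first char into head piece of each tail partition, then
-- first char as its own piece; merge block first, matching Source B's two comprehensions
def pvAltGo : List Char → List (List (List Char))
  | [] => [[[]]]
  | [c] => [[[c]]]
  | c :: d :: rest =>
    let parts := pvAltGo (d :: rest)
    parts.map (fun p => (c :: p.headD []) :: p.tail) ++ parts.map (fun p => [c] :: p)

def get_list_partitions_alt (string : String) : List (List String) :=
  (pvAltGo string.toList).map (fun p => p.map String.ofList)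

-- ===== PRECONDITION & SPEC =====
-- Pre_ excludes only the empty string, on which A raises ValueError (itertools.product with repeat=-1)
def Pre_get_list_partitions (string : String) : Prop := string ≠ ""
instance (string : String) : Decidable (Pre_get_list_partitions string) := by unfold Pre_get_list_partitions; infer_instance
def pvWitness_get_list_partitions : String := "ab"
def Spec_get_list_partitions (string : String) (out : List (List String)) : Prop := out = get_list_partitions_alt string
instance (string : String) (out : List (List String)) : Decidable (Spec_get_list_partitions string out) := by unfold Spec_get_list_partitions; infer_instance

-- ===== CLAIM (what is proved, stated in full; the proofs are below) =====
def Claim_equal_get_list_partitions : Prop := ∀ (string : String), Dom_get_list_partitions string → Pre_get_list_partitions string → Spec_get_list_partitions string (get_list_partitions string)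

-- ===== LEMMAS AND PROOFS =====

-- part accumulator is a prefix of the result
theorem pvInnerA_part (cs : List Char) (i : Nat) (seq : List Char) (p1 p2 : List (List Char)) (curr : List Char) :
    pvInnerA cs i seq (p1 ++ p2) curr = p1 ++ pvInnerA cs i seq p2 curr := by
  induction seq generalizing i p2 curr with
  | nil => simp [pvInnerA]
  | cons bit rest ih =>
    simp only [pvInnerA]
    split
    · exact ih _ _ _
    · rw [List.append_assoc]; exact ih _ _ _

-- shifting: dropping the head of cs while lowering the enumerate counter leaves the loop unchanged
theorem pvInnerA_shift (c : Char) (cs : List Char) (i : Nat) (seq : List Char) (part : List (List Char)) (curr : List Char) :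
    pvInnerA (c :: cs) (i + 1) seq part curr = pvInnerA cs i seq part curr := by
  induction seq generalizing i part curr with
  | nil => simp [pvInnerA]
  | cons bit rest ih =>
    have hget : (PySem.List.pyGet? (c :: cs) ((((i + 1 : Nat)) : Int) + 1)).getD ' '
        = (PySem.List.pyGet? cs ((i : Int) + 1)).getD ' ' := by
      rw [PySem.List.pyGet?_cons_succ]
      norm_cast
    simp only [pvInnerA, hget]
    split <;> exact ih _ _ _

-- prepending a char onto the current piece prepends it onto the head of the result
theorem pvInnerA_head (cs : List Char) (i : Nat) (seq : List Char) (c : Char) (curr : List Char) :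
    pvInnerA cs i seq [] (c :: curr)
      = (c :: (pvInnerA cs i seq [] curr).headD []) :: (pvInnerA cs i seq [] curr).tail := by
  induction seq generalizing i curr with
  | nil => simp [pvInnerA]
  | cons bit rest ih =>
    simp only [pvInnerA]
    split
    · rw [show (c :: curr) ++ [(PySem.List.pyGet? cs ((i : Int) + 1)).getD ' ']
          = c :: (curr ++ [(PySem.List.pyGet? cs ((i : Int) + 1)).getD ' ']) from rfl]
      exact ih _ _
    · rw [show ([] : List (List Char)) ++ [c :: curr] = [c :: curr] ++ [] from by simp,
          show ([] : List (List Char)) ++ [curr] = [curr] ++ [] from by simp,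
          pvInnerA_part, pvInnerA_part]
      simp

-- A's core equals B's core on nonempty character lists
theorem pvCore_eq (c : Char) (cs : List Char) :
    (pvSeqsA ((c :: cs).length - 1)).map
        (fun seq => pvInnerA (c :: cs) 0 seq [] [(PySem.List.pyGet? (c :: cs) 0).getD ' '])
      = pvAltGo (c :: cs) := by
  induction cs generalizing c with
  | nil => simp [pvSeqsA, pvInnerA, pvAltGo]
  | cons d rest ih =>
    have hlen : (c :: d :: rest).length - 1 = ((d :: rest).length - 1) + 1 := by simp
    rw [hlen]
    simp only [pvSeqsA, List.flatMap_cons, List.flatMap_nil, List.append_nil, List.map_append,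
      List.map_map, PySem.List.pyGet?_zero_cons, Option.getD_some]
    have hget : (PySem.List.pyGet? (c :: d :: rest) (((0 : Nat) : Int) + 1)).getD ' ' = d := by
      simp
    have hA : List.map ((fun seq => pvInnerA (c :: d :: rest) 0 seq [] [c]) ∘ (('0' : Char) :: ·))
          (pvSeqsA ((d :: rest).length - 1))
        = (pvAltGo (d :: rest)).map (fun p => (c :: p.headD []) :: p.tail) := by
      rw [← ih d, List.map_map]
      refine List.map_congr_left ?_
      intro seq _
      simp only [Function.comp_apply, PySem.List.pyGet?_zero_cons, Option.getD_some]
      show pvInnerA (c :: d :: rest) 0 ('0' :: seq) [] [c]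
          = (c :: (pvInnerA (d :: rest) 0 seq [] [d]).headD [])
              :: (pvInnerA (d :: rest) 0 seq [] [d]).tail
      rw [pvInnerA, if_pos rfl, hget,
          show (0 + 1 : Nat) = 0 + 1 from rfl, pvInnerA_shift,
          show ([c] ++ [d] : List Char) = c :: [d] from rfl, pvInnerA_head]
    have hB : List.map ((fun seq => pvInnerA (c :: d :: rest) 0 seq [] [c]) ∘ (('1' : Char) :: ·))
          (pvSeqsA ((d :: rest).length - 1))
        = (pvAltGo (d :: rest)).map (fun p => [c] :: p) := by
      rw [← ih d, List.map_map]
      refine List.map_congr_left ?_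
      intro seq _
      simp only [Function.comp_apply, PySem.List.pyGet?_zero_cons, Option.getD_some]
      show pvInnerA (c :: d :: rest) 0 ('1' :: seq) [] [c]
          = [c] :: pvInnerA (d :: rest) 0 seq [] [d]
      rw [pvInnerA, if_neg (by decide), hget, pvInnerA_shift,
          show ([] ++ [[c]] : List (List Char)) = [[c]] ++ [] from by simp, pvInnerA_part]
      simp
    rw [hA, hB]
    rfl

-- ===== VERDICT (by name: the statement is the Claim_ definition above) =====
theorem get_list_partitions_spec : Claim_equal_get_list_partitions := by
  intro s _ hpre
  unfold Spec_get_list_partitions get_list_partitions get_list_partitions_alt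
  have : s.toList ≠ [] := by
    intro h; exact hpre (by cases s with | _ l => simp_all)
  match hcs : s.toList with
  | [] => exact absurd hcs this
  | c :: cs =>
    rw [← pvCore_eq c cs, List.map_map]
    rfl
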